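-- pv_equiv track=rewrite | github.com/Tanyafain123/Boggle | ex12_utils.py | find_length_n_words
-- ===== SOURCE A (Python) =====
-- DIRECTIONS = [(-1, -1), (-1, 0), (-1, 1), (0, -1), (0, 1), (1, -1), (1, 0),
--               (1, 1)]
--
-- def neighbors_finder(coordinate, cell_lst):
--     """This function gets the coordinate on the board, seeks it's neighbour cells and adds them to the list.
--      Returns the list"""
--     x, y = coordinate
--     nieghbors_lst = []
--     for direction in DIRECTIONS:
--         new_x, new_y = direction
--         nieghbor = (x + new_x, y + new_y)
--         if nieghbor in cell_lst:
--             nieghbors_lst.append((x + new_x, y + new_y))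
--     return nieghbors_lst
--
-- def board_coordinates(board):
--     """This function returns the list of cell coordinates"""
--     cell_lst = []
--     for i in range(len(board)):
--         for j in range(len(board)):
--             cell_lst.append((i, j))
--     return cell_lst
--
-- def find_length_n_words(n, board, words):
--     """The function returns a list of all the paths that describe words in the collection of words that are of length n.
--     If there are multiple routes to the same word, all of them must be returned. """
--     paths = []
--     suitable_words = initial_word_filter(n, words)
--     board_cells = board_coordinates(board)
--     for coordinate in board_cells:
--         current_word = board[coordinate[0]][coordinate[1]]
--         paths.extend(
--             find_length_n_words_helper(current_word, suitable_words, board,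
--                                        [coordinate], board_cells))
--     return paths
--
-- def find_length_n_words_helper(current_word, old_suitable_words, board, path,
--                                board_cells):
--     """This function is the helper of the find_length_n_words function"""
--     new_suitable_words = word_filter(current_word, old_suitable_words)
--
--     if not new_suitable_words:
--         return []
--     if current_word in new_suitable_words:
--         return [path[:]]
--
--     x = []
--
--     for coordinate in neighbors_finder(path[-1], board_cells):
--         if len(path) + 1 <= 16:
--             if not coordinate in path:
--                 new_word = current_word + board[coordinate[0]][coordinate[1]]
--                 x.extend(
--                     find_length_n_words_helper(new_word, new_suitable_words,
--                                                board,
--                                                path + [coordinate],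
--                                                board_cells))
--     return x
--
-- def initial_word_filter(n, words):
--     """This function checks if the words in list of words matches the length n"""
--     suitable_words = []
--
--     for word in words:
--         if len(word) == n:
--             suitable_words.append(word)
--
--     return suitable_words
--
-- def word_filter(current_word, suitable_words):
--     """ This function checks if the part of the word that was composed untill now matches the beginning of some word in
--     the words that are placed in the dict.The function appends the matching words to the list and returns this list
--     """
--     words = []
--     for word in suitable_words:
--         if current_word in word:
--             words.append(word)
--     return words
-- ===== SOURCE B (Python) =====
-- DIRECTIONS = [(-1, -1), (-1, 0), (-1, 1), (0, -1), (0, 1), (1, -1), (1, 0),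
--               (1, 1)]
--
-- def find_length_n_words(n, board, words):
--     """Iterative version: per start cell, drive the DFS with an explicit
--     stack of (current_word, candidate_words, path) states."""
--     suitable = [w for w in words if len(w) == n]
--     size = len(board)
--     cells = [(i, j) for i in range(size) for j in range(size)]
--     paths = []
--     for start in cells:
--         stack = [(board[start[0]][start[1]], suitable, [start])]
--         while stack:
--             word, cand, path = stack.pop()
--             cand = [w for w in cand if word in w]
--             if not cand:
--                 continue
--             if word in cand:
--                 paths.append(path[:])
--                 continue
--             if len(path) + 1 <= 16:
--                 x, y = path[-1]
--                 for dx, dy in reversed(DIRECTIONS):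
--                     c = (x + dx, y + dy)
--                     if c in cells and c not in path:
--                         stack.append((word + board[c[0]][c[1]], cand,
--                                       path + [c]))
--     return paths
-- ===== Notes on version B (the rewrite author's own statement) =====
-- stated objective: alternative
-- what changed: Replaces A's recursive backtracking helper (with per-call word refiltering) by an explicit LIFO stack of (current_word, candidate_words, path) states driven by a while loop, pushing neighbors in reversed direction order so the pop order reproduces the DFS exactly.
import Mathlib
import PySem

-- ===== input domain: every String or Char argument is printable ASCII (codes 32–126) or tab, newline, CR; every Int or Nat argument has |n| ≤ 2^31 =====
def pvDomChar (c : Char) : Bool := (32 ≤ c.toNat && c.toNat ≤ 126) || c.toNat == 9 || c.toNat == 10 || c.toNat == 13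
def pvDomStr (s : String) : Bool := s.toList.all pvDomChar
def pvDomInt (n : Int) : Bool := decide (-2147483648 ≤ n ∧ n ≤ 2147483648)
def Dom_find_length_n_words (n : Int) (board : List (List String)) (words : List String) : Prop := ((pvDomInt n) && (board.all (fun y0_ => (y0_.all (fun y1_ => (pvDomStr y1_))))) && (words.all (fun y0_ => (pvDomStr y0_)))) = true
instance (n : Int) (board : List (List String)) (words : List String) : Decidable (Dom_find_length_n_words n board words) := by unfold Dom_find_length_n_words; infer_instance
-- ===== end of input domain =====

-- B replaces A's recursive backtracking helper by an explicit LIFO stack of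
-- (current_word, candidate_words, path) states (neighbors pushed in reversed
-- direction order), a different decomposition producing the same paths in the
-- same order.

-- ===== PORT A =====
def pvDirections : List (Int × Int) :=
  [(-1, -1), (-1, 0), (-1, 1), (0, -1), (0, 1), (1, -1), (1, 0), (1, 1)]

def neighbors_finder (coordinate : Int × Int) (cell_lst : List (Int × Int)) :
    List (Int × Int) :=
  pvDirections.foldl (fun acc d =>
    if (coordinate.1 + d.1, coordinate.2 + d.2) ∈ cell_lst then
      acc ++ [(coordinate.1 + d.1, coordinate.2 + d.2)]
    else acc) []

def board_coordinates (board : List (List String)) : List (Int × Int) :=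
  (PySem.List.pyRange 0 (board.length : Int) 1).foldl (fun acc i =>
    (PySem.List.pyRange 0 (board.length : Int) 1).foldl
      (fun acc2 j => acc2 ++ [(i, j)]) acc) []

def initial_word_filter (n : Int) (words : List String) : List String :=
  words.foldl (fun acc w => if PySem.Str.len w = n then acc ++ [w] else acc) []

def word_filter (current_word : String) (suitable_words : List String) : List String :=
  suitable_words.foldl
    (fun acc w => if PySem.Str.isIn current_word w then acc ++ [w] else acc) []

-- fuel is a pure totality guard: the recursion deepens only while
-- len(path) + 1 <= 16, so fuel = 17 - len(path) is never exhausted on any call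
-- the top-level entry (fuel = 16, len(path) = 1) reaches.
def find_length_n_words_helper : Nat → String → List String → List (List String) →
    List (Int × Int) → List (Int × Int) → List (List (Int × Int))
  | 0, _, _, _, _, _ => []
  | fuel + 1, current_word, old_suitable_words, board, path, board_cells =>
    let new_suitable_words := word_filter current_word old_suitable_words
    if new_suitable_words = [] then []
    else if current_word ∈ new_suitable_words then [path]
    else
      ((neighbors_finder (PySem.List.pyGetD path (-1) (0, 0)) board_cells).map (fun c =>
        if path.length + 1 ≤ 16 then
          if c ∉ path then
            find_length_n_words_helper fuel
              (current_word ++ PySem.List.pyGetD (PySem.List.pyGetD board c.1 []) c.2 "")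
              new_suitable_words board (path ++ [c]) board_cells
          else []
        else [])).flatten

def find_length_n_words (n : Int) (board : List (List String)) (words : List String) :
    List (List (Int × Int)) :=
  let suitable_words := initial_word_filter n words
  let board_cells := board_coordinates board
  board_cells.foldl (fun paths c =>
    paths ++
      find_length_n_words_helper 16
        (PySem.List.pyGetD (PySem.List.pyGetD board c.1 []) c.2 "")
        suitable_words board [c] board_cells) []

-- ===== PORT B =====
-- fuel is a pure totality guard for the while loop: one unit per pop; the
-- stack's total weight (pvStackM below) only shrinks, so 9^16 units suffice
-- for every stack the entry point builds.
def pvLoop (board : List (List String)) (cells : List (Int × Int)) :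
    Nat → List (List (Int × Int)) → List (String × List String × List (Int × Int)) →
    List (List (Int × Int))
  | _, acc, [] => acc
  | 0, acc, _ => acc
  | fuel + 1, acc, (word, candOld, path) :: rest =>
    let cand := candOld.filter (fun w => PySem.Str.isIn word w)
    if cand.isEmpty then pvLoop board cells fuel acc rest
    else if word ∈ cand then pvLoop board cells fuel (acc ++ [path]) rest
    else if path.length + 1 ≤ 16 then
      let last := PySem.List.pyGetD path (-1) (0, 0)
      pvLoop board cells fuel acc
        (pvDirections.reverse.foldl (fun stk d =>
          if (last.1 + d.1, last.2 + d.2) ∈ cells ∧ (last.1 + d.1, last.2 + d.2) ∉ path then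
            (word ++
              PySem.List.pyGetD (PySem.List.pyGetD board (last.1 + d.1) []) (last.2 + d.2) "",
             cand, path ++ [(last.1 + d.1, last.2 + d.2)]) :: stk
          else stk) rest)
    else pvLoop board cells fuel acc rest

def find_length_n_words_alt (n : Int) (board : List (List String)) (words : List String) :
    List (List (Int × Int)) :=
  let suitable := words.filter (fun w => PySem.Str.len w == n)
  let cells := (PySem.List.pyRange 0 (board.length : Int) 1).flatMap (fun i =>
    (PySem.List.pyRange 0 (board.length : Int) 1).map (fun j => (i, j)))
  cells.foldl (fun paths start =>
    pvLoop board cells (9 ^ 16) paths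
      [(PySem.List.pyGetD (PySem.List.pyGetD board start.1 []) start.2 "", suitable, [start])])
    []

-- ===== PRECONDITION & SPEC =====
-- Pre_ excludes ragged boards whose rows are shorter than the board's row count,
-- on which A raises IndexError at board[i][j].
def Pre_find_length_n_words (n : Int) (board : List (List String)) (words : List String) : Prop :=
  ∀ row ∈ board, board.length ≤ row.length
instance (n : Int) (board : List (List String)) (words : List String) :
    Decidable (Pre_find_length_n_words n board words) := by
  unfold Pre_find_length_n_words; infer_instance

def pvWitness_find_length_n_words : Int × List (List String) × List String :=
  (3, [["c", "a", "t"], ["a", "a", "a"], ["t", "a", "c"]], ["cat"])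

def Spec_find_length_n_words (n : Int) (board : List (List String)) (words : List String) (out : List (List (Int × Int))) : Prop := out = find_length_n_words_alt n board words
instance (n : Int) (board : List (List String)) (words : List String) (out : List (List (Int × Int))) : Decidable (Spec_find_length_n_words n board words out) := by unfold Spec_find_length_n_words; infer_instance

-- ===== CLAIM (what is proved, stated in full; the proofs are below) =====
def Claim_equal_find_length_n_words : Prop := ∀ (n : Int) (board : List (List String)) (words : List String), Dom_find_length_n_words n board words → Pre_find_length_n_words n board words → Spec_find_length_n_words n board words (find_length_n_words n board words)

-- ===== LEMMAS AND PROOFS =====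

def pvWeight (st : String × List String × List (Int × Int)) : Nat :=
  9 ^ (17 - st.2.2.length)

def pvStackM (stack : List (String × List String × List (Int × Int))) : Nat :=
  (stack.map pvWeight).sum

lemma pvStackM_foldl_le {α : Type} (dirs : List α)
    (Q : α → Prop) [DecidablePred Q]
    (e : α → String × List String × List (Int × Int)) (W : Nat)
    (he : ∀ d, pvWeight (e d) ≤ W) :
    ∀ stk, pvStackM (dirs.foldl (fun s d => if Q d then e d :: s else s) stk)
      ≤ dirs.length * W + pvStackM stk := by
  induction dirs with
  | nil => intro stk; simp
  | cons d dirs ih =>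
    intro stk
    by_cases hq : Q d
    · simp only [List.foldl_cons, if_pos hq]
      calc pvStackM (dirs.foldl (fun s d => if Q d then e d :: s else s) (e d :: stk))
          ≤ dirs.length * W + pvStackM (e d :: stk) := ih _
        _ ≤ (d :: dirs).length * W + pvStackM stk := by
            simp only [pvStackM, List.map_cons, List.sum_cons, List.length_cons]
            have := he d; nlinarith
    · simp only [List.foldl_cons, if_neg hq]
      calc pvStackM (dirs.foldl (fun s d => if Q d then e d :: s else s) stk)
          ≤ dirs.length * W + pvStackM stk := ih _
        _ ≤ (d :: dirs).length * W + pvStackM stk := by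
            simp only [List.length_cons]; nlinarith

lemma word_filter_eq (cw : String) (sw : List String) :
    word_filter cw sw = sw.filter (fun w => PySem.Str.isIn cw w) := by
  simpa using PySem.List.foldl_append_if (fun w => PySem.Str.isIn cw w) (fun w => w) sw []

lemma initial_word_filter_eq (n : Int) (words : List String) :
    initial_word_filter n words = words.filter (fun w => PySem.Str.len w == n) := by
  unfold initial_word_filter
  have h : ∀ (ws : List String) (acc : List String),
      ws.foldl (fun acc w => if PySem.Str.len w = n then acc ++ [w] else acc) acc
        = acc ++ ws.filter (fun w => PySem.Str.len w == n) := by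
    intro ws
    induction ws with
    | nil => intro acc; simp
    | cons w ws ih =>
      intro acc
      rw [List.foldl_cons, List.filter_cons, ih]
      by_cases hw : PySem.Str.len w = n
      · rw [if_pos hw, if_pos (by simpa using hw)]
        simp
      · rw [if_neg hw, if_neg (by simpa using hw)]
  simpa using h words []

lemma board_coordinates_eq (board : List (List String)) :
    board_coordinates board
      = (PySem.List.pyRange 0 (board.length : Int) 1).flatMap (fun i =>
          (PySem.List.pyRange 0 (board.length : Int) 1).map (fun j => (i, j))) := by
  unfold board_coordinates
  rw [PySem.List.foldl_congr_mem _ _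
    (fun acc i => acc ++ (PySem.List.pyRange 0 (board.length : Int) 1).map (fun j => (i, j))) _
    (by intro acc i _; exact PySem.List.foldl_append_singleton_eq_map _ _ _)]
  simpa using PySem.List.foldl_append_eq_flatMap
    (fun i => (PySem.List.pyRange 0 (board.length : Int) 1).map (fun j => (i, j)))
    (PySem.List.pyRange 0 (board.length : Int) 1) []

lemma neighbors_finder_eq (last : Int × Int) (cells : List (Int × Int)) :
    neighbors_finder last cells
      = pvDirections.filterMap (fun d =>
          if (last.1 + d.1, last.2 + d.2) ∈ cells then some (last.1 + d.1, last.2 + d.2)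
          else none) := by
  unfold neighbors_finder
  have h : ∀ (dirs : List (Int × Int)) (acc : List (Int × Int)),
      dirs.foldl (fun acc d =>
        if (last.1 + d.1, last.2 + d.2) ∈ cells then acc ++ [(last.1 + d.1, last.2 + d.2)]
        else acc) acc
      = acc ++ dirs.filterMap (fun d =>
          if (last.1 + d.1, last.2 + d.2) ∈ cells then some (last.1 + d.1, last.2 + d.2)
          else none) := by
    intro dirs
    induction dirs with
    | nil => intro acc; simp
    | cons d dirs ih =>
      intro acc
      by_cases hd : (last.1 + d.1, last.2 + d.2) ∈ cells
      · simp [hd, ih]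
      · simp [hd, ih]
  simpa using h pvDirections []

lemma foldl_rev_push {α β : Type} (dirs : List α) (Q : α → Prop) [DecidablePred Q]
    (e : α → β) (stk : List β) :
    dirs.reverse.foldl (fun s d => if Q d then e d :: s else s) stk
      = (dirs.filterMap fun d => if Q d then some (e d) else none) ++ stk := by
  induction dirs generalizing stk with
  | nil => simp
  | cons d dirs ih =>
    simp only [List.reverse_cons, List.foldl_append, List.foldl_cons, List.foldl_nil]
    by_cases hd : Q d
    · simp [hd, ih]
    · simp [hd, ih]

lemma children_eq (cw : String) (cand : List String) (board : List (List String))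
    (path : List (Int × Int)) (cells : List (Int × Int)) (last : Int × Int)
    (hL : path.length + 1 ≤ 16) :
    ∀ dirs : List (Int × Int),
      ((dirs.filterMap fun d =>
          if (last.1 + d.1, last.2 + d.2) ∈ cells ∧ (last.1 + d.1, last.2 + d.2) ∉ path then
            some (cw ++
                PySem.List.pyGetD (PySem.List.pyGetD board (last.1 + d.1) [])
                  (last.2 + d.2) "",
              cand, path ++ [(last.1 + d.1, last.2 + d.2)])
          else none).map
        (fun st => find_length_n_words_helper (17 - st.2.2.length) st.1 st.2.1 board st.2.2 cells)).flatten
      = ((dirs.filterMap fun d =>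
            if (last.1 + d.1, last.2 + d.2) ∈ cells then some (last.1 + d.1, last.2 + d.2)
            else none).map (fun c =>
          if path.length + 1 ≤ 16 then
            if c ∉ path then
              find_length_n_words_helper (16 - path.length)
                (cw ++ PySem.List.pyGetD (PySem.List.pyGetD board c.1 []) c.2 "")
                cand board (path ++ [c]) cells
            else []
          else [])).flatten := by
  intro dirs
  induction dirs with
  | nil => simp
  | cons d dirs ih =>
    by_cases hm : (last.1 + d.1, last.2 + d.2) ∈ cells
    · by_cases hp : (last.1 + d.1, last.2 + d.2) ∈ path
      · have hnand : ¬((last.1 + d.1, last.2 + d.2) ∈ cells ∧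
            (last.1 + d.1, last.2 + d.2) ∉ path) := by
          intro hand; exact hand.2 hp
        simp only [List.filterMap_cons, if_pos hm, if_neg hnand]
        rw [ih]
        simp [hL, hp]
      · have hand : (last.1 + d.1, last.2 + d.2) ∈ cells ∧
            (last.1 + d.1, last.2 + d.2) ∉ path := ⟨hm, hp⟩
        simp only [List.filterMap_cons, if_pos hm, if_pos hand]
        simp only [List.map_cons, List.flatten_cons]
        rw [ih]
        have hfz : 17 - (path ++ [(last.1 + d.1, last.2 + d.2)]).length = 16 - path.length := by
          simp only [List.length_append, List.length_cons, List.length_nil]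
          omega
        rw [hfz]
        simp [hL, hp]
    · have hnand : ¬((last.1 + d.1, last.2 + d.2) ∈ cells ∧
          (last.1 + d.1, last.2 + d.2) ∉ path) := by
        intro hand; exact hm hand.1
      simp only [List.filterMap_cons, if_neg hm, if_neg hnand]
      exact ih

lemma pvLoop_eq_aux (board : List (List String)) (cells : List (Int × Int)) :
    ∀ (fuel : Nat) (acc : List (List (Int × Int)))
      (stack : List (String × List String × List (Int × Int))),
      pvStackM stack ≤ fuel → (∀ st ∈ stack, st.2.2.length ≤ 16) →
      pvLoop board cells fuel acc stack
        = acc ++ (stack.map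
            (fun st => find_length_n_words_helper (17 - st.2.2.length) st.1 st.2.1
              board st.2.2 cells)).flatten := by
  intro fuel
  induction fuel with
  | zero =>
    intro acc stack hm _
    match stack with
    | [] => rw [pvLoop]; simp
    | st :: rest =>
      exfalso
      have : 0 < pvWeight st := Nat.pow_pos (by norm_num)
      simp only [pvStackM, List.map_cons, List.sum_cons] at hm
      omega
  | succ fuel ih =>
    intro acc stack hm hinv
    match stack with
    | [] => rw [pvLoop]; simp
    | (word, candOld, path) :: rest =>
      have hw1 : 0 < pvWeight (word, candOld, path) := Nat.pow_pos (by norm_num)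
      have hmc : pvWeight (word, candOld, path) + pvStackM rest ≤ fuel + 1 := by
        simpa [pvStackM] using hm
      have hrest : pvStackM rest ≤ fuel := by omega
      have hrinv : ∀ st ∈ rest, st.2.2.length ≤ 16 := fun st hst => hinv st (by simp [hst])
      have hplen : path.length ≤ 16 := by
        simpa using hinv (word, candOld, path) (by simp)
      have hfz : 17 - path.length = (16 - path.length) + 1 := by omega
      have hcand : candOld.filter (fun w => PySem.Str.isIn word w) = word_filter word candOld :=
        (word_filter_eq _ _).symm
      rw [pvLoop]
      simp only [List.map_cons, List.flatten_cons]
      rw [hfz, find_length_n_words_helper]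
      by_cases hempty : (candOld.filter (fun w => PySem.Str.isIn word w)).isEmpty
      · rw [if_pos hempty, ih _ _ hrest hrinv]
        have he : word_filter word candOld = [] := by
          rw [← hcand]; exact List.isEmpty_iff.mp hempty
        simp [he]
      · rw [if_neg hempty]
        have hne : word_filter word candOld ≠ [] := by
          rw [← hcand]; exact fun hh => hempty (by rw [hh]; rfl)
        by_cases hmem : word ∈ candOld.filter (fun w => PySem.Str.isIn word w)
        · rw [if_pos hmem, ih _ _ hrest hrinv]
          have hmem' : word ∈ word_filter word candOld := by rw [← hcand]; exact hmem
          simp [hne, hmem']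
        · rw [if_neg hmem]
          have hmem' : word ∉ word_filter word candOld := by rw [← hcand]; exact hmem
          by_cases h : path.length + 1 ≤ 16
          · rw [if_pos h]
            have hb := pvStackM_foldl_le pvDirections.reverse
              (fun d => ((PySem.List.pyGetD path (-1) (0, 0)).1 + d.1,
                         (PySem.List.pyGetD path (-1) (0, 0)).2 + d.2) ∈ cells ∧
                        ((PySem.List.pyGetD path (-1) (0, 0)).1 + d.1,
                         (PySem.List.pyGetD path (-1) (0, 0)).2 + d.2) ∉ path)
              (fun d =>
                (word ++
                  PySem.List.pyGetD
                    (PySem.List.pyGetD board ((PySem.List.pyGetD path (-1) (0, 0)).1 + d.1) [])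
                    ((PySem.List.pyGetD path (-1) (0, 0)).2 + d.2) "",
                 candOld.filter (fun w => PySem.Str.isIn word w),
                 path ++ [((PySem.List.pyGetD path (-1) (0, 0)).1 + d.1,
                           (PySem.List.pyGetD path (-1) (0, 0)).2 + d.2)]))
              (9 ^ (16 - path.length))
              (by intro d
                  simp only [pvWeight, List.length_append, List.length_cons, List.length_nil]
                  exact Nat.pow_le_pow_right (by norm_num) (by omega)) rest
            have hdec : pvStackM
                (pvDirections.reverse.foldl (fun stk d =>
                  if ((PySem.List.pyGetD path (-1) (0, 0)).1 + d.1,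
                      (PySem.List.pyGetD path (-1) (0, 0)).2 + d.2) ∈ cells ∧
                     ((PySem.List.pyGetD path (-1) (0, 0)).1 + d.1,
                      (PySem.List.pyGetD path (-1) (0, 0)).2 + d.2) ∉ path then
                    (word ++
                      PySem.List.pyGetD
                        (PySem.List.pyGetD board ((PySem.List.pyGetD path (-1) (0, 0)).1 + d.1) [])
                        ((PySem.List.pyGetD path (-1) (0, 0)).2 + d.2) "",
                     candOld.filter (fun w => PySem.Str.isIn word w),
                     path ++ [((PySem.List.pyGetD path (-1) (0, 0)).1 + d.1,
                               (PySem.List.pyGetD path (-1) (0, 0)).2 + d.2)]) :: stk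
                  else stk) rest) ≤ fuel := by
              refine le_trans hb ?_
              have hlen : pvDirections.reverse.length = 8 := by simp [pvDirections]
              rw [hlen]
              have hww : pvWeight (word, candOld, path) = 9 ^ (16 - path.length) * 9 := by
                simp only [pvWeight]; rw [hfz, pow_succ]
              have hpos : 0 < 9 ^ (16 - path.length) := Nat.pow_pos (by norm_num)
              omega
            have hpinv : ∀ st ∈ (pvDirections.reverse.foldl (fun stk d =>
                  if ((PySem.List.pyGetD path (-1) (0, 0)).1 + d.1,
                      (PySem.List.pyGetD path (-1) (0, 0)).2 + d.2) ∈ cells ∧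
                     ((PySem.List.pyGetD path (-1) (0, 0)).1 + d.1,
                      (PySem.List.pyGetD path (-1) (0, 0)).2 + d.2) ∉ path then
                    (word ++
                      PySem.List.pyGetD
                        (PySem.List.pyGetD board ((PySem.List.pyGetD path (-1) (0, 0)).1 + d.1) [])
                        ((PySem.List.pyGetD path (-1) (0, 0)).2 + d.2) "",
                     candOld.filter (fun w => PySem.Str.isIn word w),
                     path ++ [((PySem.List.pyGetD path (-1) (0, 0)).1 + d.1,
                               (PySem.List.pyGetD path (-1) (0, 0)).2 + d.2)]) :: stk
                  else stk) rest), st.2.2.length ≤ 16 := by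
              rw [foldl_rev_push]
              intro st hst
              rcases List.mem_append.mp hst with hst | hst
              · rcases List.mem_filterMap.mp hst with ⟨d, _, hd⟩
                split at hd
                · cases hd
                  simp only [List.length_append, List.length_cons, List.length_nil]
                  omega
                · cases hd
              · exact hrinv st hst
            rw [ih _ _ hdec hpinv]
            rw [foldl_rev_push pvDirections
              (fun d => ((PySem.List.pyGetD path (-1) (0, 0)).1 + d.1,
                         (PySem.List.pyGetD path (-1) (0, 0)).2 + d.2) ∈ cells ∧
                        ((PySem.List.pyGetD path (-1) (0, 0)).1 + d.1,
                         (PySem.List.pyGetD path (-1) (0, 0)).2 + d.2) ∉ path)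
              (fun d =>
                (word ++
                  PySem.List.pyGetD
                    (PySem.List.pyGetD board ((PySem.List.pyGetD path (-1) (0, 0)).1 + d.1) [])
                    ((PySem.List.pyGetD path (-1) (0, 0)).2 + d.2) "",
                 candOld.filter (fun w => PySem.Str.isIn word w),
                 path ++ [((PySem.List.pyGetD path (-1) (0, 0)).1 + d.1,
                           (PySem.List.pyGetD path (-1) (0, 0)).2 + d.2)])) rest]
            simp only [List.map_append, List.flatten_append, ← List.append_assoc]
            congr 1
            congr 1
            rw [children_eq word (candOld.filter (fun w => PySem.Str.isIn word w)) board path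
              cells (PySem.List.pyGetD path (-1) (0, 0)) h pvDirections]
            rw [← neighbors_finder_eq, hcand]
            simp [hne, hmem']
          · rw [if_neg h, ih _ _ hrest hrinv]
            rw [if_neg hne, if_neg hmem']
            rw [List.map_congr_left (g := fun _ => ([] : List (List (Int × Int))))
              (fun c _ => if_neg h)]
            simp

lemma pvLoop_eq (board : List (List String)) (cells : List (Int × Int))
    (acc : List (List (Int × Int))) (word : String) (cand : List String) (c : Int × Int) :
    pvLoop board cells (9 ^ 16) acc [(word, cand, [c])]
      = acc ++ find_length_n_words_helper 16 word cand board [c] cells := by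
  rw [pvLoop_eq_aux board cells (9 ^ 16) acc [(word, cand, [c])]
    (by simp [pvStackM, pvWeight]) (by simp)]
  simp

-- ===== VERDICT (by name: the statement is the Claim_ definition above) =====
theorem find_length_n_words_spec : Claim_equal_find_length_n_words := by
  intro n board words _ _
  unfold Spec_find_length_n_words
  unfold find_length_n_words find_length_n_words_alt
  rw [initial_word_filter_eq, board_coordinates_eq]
  rw [PySem.List.foldl_congr_mem _ _
    (fun paths c =>
      pvLoop board
        ((PySem.List.pyRange 0 (board.length : Int) 1).flatMap (fun i =>
          (PySem.List.pyRange 0 (board.length : Int) 1).map (fun j => (i, j))))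
        (9 ^ 16) paths
        [(PySem.List.pyGetD (PySem.List.pyGetD board c.1 []) c.2 "",
          words.filter (fun w => PySem.Str.len w == n), [c])]) _
    (by intro paths c _; beta_reduce; rw [pvLoop_eq])]
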